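-- pv_equiv track=rewrite | github.com/MohamedAsifS/my_LeetCode | 1742-maximum-number-of-balls-in-a-box/1742-maximum-number-of-balls-in-a-box.py | countBalls
-- ===== SOURCE A (Python) =====
-- def countBalls(lowLimit: int, highLimit: int) -> int:
--
--     num={}
--
--     for i in range(lowLimit,highLimit+1):
--         sum=0
--         while i>0:
--             digit=i%10
--             sum+=digit
--             i//=10
--         if sum not in num:
--             num[sum]=1
--         else:
--             num[sum]+=1
--
--     value=list(num.values())
--     maxi=max(value)
--
--
--     return maxi
-- ===== SOURCE B (Python) =====
-- def _digit_sum(i: int) -> int: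
--     # matches A's while-loop: 0 for i <= 0
--     return i % 10 + _digit_sum(i // 10) if i > 0 else 0
--
-- def countBalls(lowLimit: int, highLimit: int) -> int:
--     # build a fixed 91-slot bucket array by walking the range downward
--     counts = [0] * 91
--     n = highLimit
--     while n >= lowLimit:
--         counts[_digit_sum(n)] += 1
--         n -= 1
--     # running-max scan instead of max()
--     best = 0
--     for c in counts:
--         if c > best:
--             best = c
--     return best
-- ===== Notes on version B (the rewrite author's own statement) =====
-- stated objective: alternative
-- what changed: B replaces A's forward loop that groups counts in a hash dict (membership branch, then max over dict.values()) by a downward while-loop that increments a fixed 91-slot bucket array indexed by a recursively computed digit sum, finishing with a manual running-max scan instead of max().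
import Mathlib
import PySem

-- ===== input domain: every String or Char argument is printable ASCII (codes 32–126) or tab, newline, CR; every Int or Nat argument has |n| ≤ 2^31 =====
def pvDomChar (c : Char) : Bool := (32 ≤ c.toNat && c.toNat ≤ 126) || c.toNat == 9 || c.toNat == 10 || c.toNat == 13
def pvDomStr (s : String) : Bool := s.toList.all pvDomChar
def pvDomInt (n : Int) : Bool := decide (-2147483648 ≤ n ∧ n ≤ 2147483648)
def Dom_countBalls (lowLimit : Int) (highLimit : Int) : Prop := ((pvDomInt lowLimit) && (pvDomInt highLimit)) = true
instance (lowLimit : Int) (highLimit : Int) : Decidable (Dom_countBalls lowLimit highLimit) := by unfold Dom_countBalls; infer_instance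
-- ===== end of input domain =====

-- B replaces A's forward dict-grouping loop (and its final max over dict.values) by a downward while-loop
-- over a fixed 91-slot bucket array with a recursive digit sum and a running-max scan (objective: alternative
-- structure, similar cost).

-- ===== PORT A =====
-- A's inner 'while i > 0: digit = i % 10; sum += digit; i //= 10' as a tail recursion on (i, sum)
def pvDigitLoopA (i : Int) (s : Int) : Int :=
  if _h : 0 < i then pvDigitLoopA (PySem.Int.floordiv i 10) (s + PySem.Int.mod i 10) else s
termination_by i.toNat
decreasing_by
  have h10 : PySem.Int.floordiv i 10 = i / 10 := PySem.Int.floordiv_eq_ediv_of_pos (by omega)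
  omega

def countBalls (lowLimit : Int) (highLimit : Int) : Int :=
  let num := (PySem.List.pyRange lowLimit (highLimit + 1) 1).foldl
    (fun num i =>
      let sum := pvDigitLoopA i 0
      if num.contains sum = false then num.insert sum 1
      else num.insert sum (num.getD sum 0 + 1))
    (PySem.Dict.empty (κ := Int) (ν := Int))
  let value := PySem.Dict.values num
  (PySem.List.max? value (fun x => x)).getD 0   -- max(value); on the empty range Python raises ValueError, excluded by Pre_

-- ===== PORT B =====
-- B's '_digit_sum(i) = i % 10 + _digit_sum(i // 10) if i > 0 else 0'
def pvDigitSum (i : Int) : Int :=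
  if _h : 0 < i then PySem.Int.mod i 10 + pvDigitSum (PySem.Int.floordiv i 10) else 0
termination_by i.toNat
decreasing_by
  have h10 : PySem.Int.floordiv i 10 = i / 10 := PySem.Int.floordiv_eq_ediv_of_pos (by omega)
  omega

-- B's 'while n >= lowLimit: counts[_digit_sum(n)] += 1; n -= 1' as a tail recursion on n
def pvLoopB (lowLimit : Int) (n : Int) (counts : List Int) : List Int :=
  if _h : lowLimit ≤ n then
    pvLoopB lowLimit (n - 1)
      (PySem.List.pySetD counts (pvDigitSum n) (PySem.List.pyGetD counts (pvDigitSum n) 0 + 1))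
  else counts
termination_by (n - lowLimit + 1).toNat

def countBalls_alt (lowLimit : Int) (highLimit : Int) : Int :=
  let counts := pvLoopB lowLimit highLimit (List.replicate 91 (0 : Int))
  counts.foldl (fun best c => if c > best then c else best) 0

-- ===== PRECONDITION & SPEC =====
-- A raises ValueError (max() of an empty sequence) exactly when the range is empty, i.e. lowLimit > highLimit.
def Pre_countBalls (lowLimit : Int) (highLimit : Int) : Prop := lowLimit ≤ highLimit
instance (lowLimit : Int) (highLimit : Int) : Decidable (Pre_countBalls lowLimit highLimit) := by unfold Pre_countBalls; infer_instance
def pvWitness_countBalls : Int × Int := (0, 5)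

def Spec_countBalls (lowLimit : Int) (highLimit : Int) (out : Int) : Prop := out = countBalls_alt lowLimit highLimit
instance (lowLimit : Int) (highLimit : Int) (out : Int) : Decidable (Spec_countBalls lowLimit highLimit out) := by unfold Spec_countBalls; infer_instance

-- ===== CLAIM (what is proved, stated in full; the proofs are below) =====
def Claim_equal_countBalls : Prop := ∀ (lowLimit : Int) (highLimit : Int), Dom_countBalls lowLimit highLimit → Pre_countBalls lowLimit highLimit → Spec_countBalls lowLimit highLimit (countBalls lowLimit highLimit)

-- ===== LEMMAS AND PROOFS =====

theorem pvDigitLoopA_eq (i : Int) : ∀ s, pvDigitLoopA i s = s + pvDigitSum i := by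
  have key : ∀ n : Nat, ∀ i : Int, i.toNat ≤ n → ∀ s, pvDigitLoopA i s = s + pvDigitSum i := by
    intro n
    induction n with
    | zero =>
      intro i hi s
      rw [pvDigitLoopA, pvDigitSum]
      split
      · exfalso; omega
      · omega
    | succ n ih =>
      intro i hi s
      rw [pvDigitLoopA, pvDigitSum]
      split
      · rename_i h
        have h10 : PySem.Int.floordiv i 10 = i / 10 := PySem.Int.floordiv_eq_ediv_of_pos (by omega)
        rw [ih (PySem.Int.floordiv i 10) (by omega)]
        ring
      · omega
  exact key i.toNat i le_rfl

theorem pvDigitSum_nonneg (i : Int) : 0 ≤ pvDigitSum i := by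
  have key : ∀ n : Nat, ∀ i : Int, i.toNat ≤ n → 0 ≤ pvDigitSum i := by
    intro n
    induction n with
    | zero =>
      intro i hi
      rw [pvDigitSum]
      split
      · exfalso; omega
      · omega
    | succ n ih =>
      intro i hi
      rw [pvDigitSum]
      split
      · rename_i h
        have h10 : PySem.Int.floordiv i 10 = i / 10 := PySem.Int.floordiv_eq_ediv_of_pos (by omega)
        have hm : 0 ≤ PySem.Int.mod i 10 := PySem.Int.mod_nonneg _ (by omega)
        have := ih (PySem.Int.floordiv i 10) (by omega)
        omega
      · omega
  exact key i.toNat i le_rfl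

theorem pvDigitSum_le (k : Nat) : ∀ i : Int, i < 10 ^ k → pvDigitSum i ≤ 9 * k := by
  induction k with
  | zero =>
    intro i hi
    rw [pvDigitSum]
    split
    · exfalso; simp at hi; omega
    · omega
  | succ k ih =>
    intro i hi
    rw [pvDigitSum]
    split
    · rename_i h
      have h10 : PySem.Int.floordiv i 10 = i / 10 := PySem.Int.floordiv_eq_ediv_of_pos (by omega)
      have hm : PySem.Int.mod i 10 < 10 := PySem.Int.mod_lt _ (by omega)
      have hm0 : 0 ≤ PySem.Int.mod i 10 := PySem.Int.mod_nonneg _ (by omega)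
      have hp : (10 : Int) ^ (k + 1) = 10 ^ k * 10 := by ring
      have hlt : i / 10 < 10 ^ k := by omega
      have := ih (PySem.Int.floordiv i 10) (by omega)
      push_cast
      omega
    · positivity

theorem pvDigitSum_lt_91 (i : Int) (h : i ≤ 2147483648) : pvDigitSum i < 91 := by
  have := pvDigitSum_le 10 i (by norm_num; omega)
  omega

theorem stepA_eq (d : PySem.Dict Int Int) (i : Int) :
    (let sum := pvDigitLoopA i 0
     if d.contains sum = false then d.insert sum 1
     else d.insert sum (d.getD sum 0 + 1))
    = d.insert (pvDigitSum i) (d.getD (pvDigitSum i) 0 + 1) := by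
  have hs : pvDigitLoopA i 0 = pvDigitSum i := by rw [pvDigitLoopA_eq]; ring
  simp only [hs]
  split
  · rename_i hc
    rw [PySem.Dict.getD_of_not_contains (h := by simpa using hc)]
    norm_num
  · rfl

theorem foldA_eq (L : List Int) :
    L.foldl (fun num i =>
      let sum := pvDigitLoopA i 0
      if num.contains sum = false then num.insert sum 1
      else num.insert sum (num.getD sum 0 + 1)) (PySem.Dict.empty (κ := Int) (ν := Int))
    = PySem.Dict.counter (L.map pvDigitSum) := by
  rw [← PySem.Dict.foldl_insert_getD_add_one_eq_counter, List.foldl_map]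
  simp only [stepA_eq]

theorem getD_set_lt (l : List Int) (i j : Nat) (a d : Int) (h : j < l.length) :
    (l.set i a).getD j d = if i = j then a else l.getD j d := by
  simp [List.getD_eq_getElem?_getD, h]
  split <;> simp_all

-- the invariant of B's downward while-loop: lengths preserved, each slot t accumulates the
-- number of k in [lowLimit, n] with digit sum t
theorem loopB_inv (low : Int) : ∀ (fuel : Nat) (n : Int), (n - low + 1).toNat ≤ fuel →
    (∀ k : Int, low ≤ k → k ≤ n → 0 ≤ pvDigitSum k ∧ pvDigitSum k < 91) →
    ∀ (c : List Int), c.length = 91 →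
    (pvLoopB low n c).length = 91 ∧
    ∀ t : Nat, t < 91 →
      (pvLoopB low n c).getD t 0
        = c.getD t 0 + (((PySem.List.pyRange low (n + 1) 1).map pvDigitSum).count (t : Int) : Int) := by
  intro fuel
  induction fuel with
  | zero =>
    intro n hf hall c hc
    rw [pvLoopB]
    split
    · exfalso; omega
    · refine ⟨hc, fun t ht => ?_⟩
      rw [PySem.List.pyRange_one_eq_nil (by omega)]
      simp
  | succ fuel ih =>
    intro n hf hall c hc
    rw [pvLoopB]
    split
    · rename_i h
      have ha := hall n h le_rfl
      have hset : PySem.List.pySetD c (pvDigitSum n) (PySem.List.pyGetD c (pvDigitSum n) 0 + 1)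
          = c.set (pvDigitSum n).toNat (c.getD (pvDigitSum n).toNat 0 + 1) := by
        rw [PySem.List.pySetD_of_nonneg (h := ha.1),
            PySem.List.pyGetD_eq_getElem (h0 := ha.1) (h1 := by rw [hc]; exact_mod_cast ha.2)]
        congr 1
        rw [List.getD_eq_getElem?_getD, List.getElem?_eq_getElem (by omega)]
        simp
      have hlen : (PySem.List.pySetD c (pvDigitSum n) (PySem.List.pyGetD c (pvDigitSum n) 0 + 1)).length = 91 := by
        rw [hset]; simpa using hc
      obtain ⟨hl1, hl2⟩ := ih (n - 1) (by omega)
        (fun k hk1 hk2 => hall k hk1 (by omega)) _ hlen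
      refine ⟨hl1, fun t ht => ?_⟩
      rw [hl2 t ht, hset, getD_set_lt _ _ _ _ _ (by omega)]
      have hsplit : PySem.List.pyRange low (n + 1) 1
          = PySem.List.pyRange low n 1 ++ [n] := by
        have := PySem.List.pyRange_one_succ_right (a := low) (b := n) (by omega)
        simpa using this
      have hn1 : (n - 1) + 1 = n := by omega
      rw [hsplit]
      simp only [List.map_append, List.map_cons, List.map_nil, List.count_append,
        List.count_cons, List.count_nil, hn1]
      split
      · rename_i he
        have hds : pvDigitSum n = (t : Int) := by omega
        simp [hds]
        ring
      · rename_i he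
        have : ¬ (pvDigitSum n == (t : Int)) := by simp; omega
        simp [this]
    · refine ⟨hc, fun t ht => ?_⟩
      rw [PySem.List.pyRange_one_eq_nil (by omega)]
      simp

-- running max with init 0 over a nonneg list x :: tail equals Python's max()
theorem runmax_eq (l : List Int) (hl : l ≠ []) (hnn : ∀ x ∈ l, 0 ≤ x) :
    l.foldl (fun best c => if c > best then c else best) 0
      = (PySem.List.max? l (fun x => x)).getD 0 := by
  have hfun : (fun (best c : Int) => if c > best then c else best) = max := by
    funext b c
    rw [max_def]
    split_ifs <;> omega
  rcases l with _ | ⟨x, t⟩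
  · exact absurd rfl hl
  · rw [PySem.List.max?_id_cons, hfun]
    have hx : max 0 x = x := by
      have := hnn x (by simp)
      omega
    simp [hx]

theorem final_eq (S : List Int) (hS : S ≠ []) (hb : ∀ x ∈ S, 0 ≤ x ∧ x < 91)
    (arr : List Int) (hlen : arr.length = 91)
    (harr : ∀ t : Nat, t < 91 → arr.getD t 0 = (S.count (t : Int) : Int)) :
    (PySem.List.max? (PySem.Dict.values (PySem.Dict.counter S)) (fun x => x)).getD 0
      = (PySem.List.max? arr (fun x => x)).getD 0 := by
  have hV : PySem.Dict.values (PySem.Dict.counter S)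
      = (PySem.Set.ofList S).map (fun k => (S.count k : Int)) := by
    have := PySem.Dict.items_counter (xs := S)
    simp [PySem.Dict.values, this]
  have hVne : PySem.Dict.values (PySem.Dict.counter S) ≠ [] := by
    rw [hV]
    rcases S with _ | ⟨x, S'⟩
    · exact absurd rfl hS
    · have hx : x ∈ PySem.Set.ofList (x :: S') := by
        rw [PySem.Set.mem_ofList]; simp
      intro hnil
      rcases List.map_eq_nil_iff.mp hnil with h
      simp [h] at hx
  have hAne : arr ≠ [] := by intro h; rw [h] at hlen; simp at hlen
  obtain ⟨mV, hmV⟩ : ∃ m, PySem.List.max? (PySem.Dict.values (PySem.Dict.counter S)) (fun x => x) = some m := by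
    cases h : PySem.List.max? (PySem.Dict.values (PySem.Dict.counter S)) (fun x => x) with
    | none => rw [PySem.List.max?_eq_none_iff] at h; exact absurd h hVne
    | some m => exact ⟨m, rfl⟩
  obtain ⟨mA, hmA⟩ : ∃ m, PySem.List.max? arr (fun x => x) = some m := by
    cases h : PySem.List.max? arr (fun x => x) with
    | none => rw [PySem.List.max?_eq_none_iff] at h; exact absurd h hAne
    | some m => exact ⟨m, rfl⟩
  rw [hmV, hmA]
  have hmVmem := PySem.List.max?_mem hmV
  rw [hV] at hmVmem
  obtain ⟨k, hkmem, hkeq⟩ := List.mem_map.mp hmVmem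
  have hkS : k ∈ S := (PySem.Set.mem_ofList _ _).mp hkmem
  have hk91 := hb k hkS
  have hmVarr : mV ∈ arr := by
    have ht : k.toNat < arr.length := by omega
    have : arr.getD k.toNat 0 = mV := by
      rw [harr k.toNat (by omega)]
      have hk' : ((k.toNat : Int)) = k := by omega
      rw [hk', ← hkeq]
    rw [List.getD_eq_getElem?_getD, List.getElem?_eq_getElem ht] at this
    simp at this
    rw [← this]
    exact List.getElem_mem ht
  have h1 : mV ≤ mA := PySem.List.max?_isMax hmA mV hmVarr
  have h2 : mA ≤ mV := by
    have hmAmem := PySem.List.max?_mem hmA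
    obtain ⟨t, ht, hteq⟩ := List.mem_iff_getElem.mp hmAmem
    have ht91 : t < 91 := by omega
    have hcnt : mA = (S.count (t : Int) : Int) := by
      rw [← harr t ht91, List.getD_eq_getElem?_getD, List.getElem?_eq_getElem ht]
      simp [hteq]
    by_cases htS : (t : Int) ∈ S
    · have : mA ∈ (PySem.Set.ofList S).map (fun k => (S.count k : Int)) :=
        List.mem_map.mpr ⟨(t : Int), (PySem.Set.mem_ofList _ _).mpr htS, hcnt.symm⟩
      rw [← hV] at this
      exact PySem.List.max?_isMax hmV mA this
    · have : S.count (t : Int) = 0 := List.count_eq_zero.mpr htS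
      have hpos : 0 < S.count k := List.count_pos_iff.mpr hkS
      rw [hcnt, this]
      rw [← hkeq]
      push_cast
      omega
  simp
  omega

-- ===== VERDICT (by name: the statement is the Claim_ definition above) =====
theorem countBalls_spec : Claim_equal_countBalls := by
  intro low high hdom hpre
  unfold Spec_countBalls
  have hdom' : low ≤ 2147483648 ∧ high ≤ 2147483648 := by
    unfold Dom_countBalls pvDomInt at hdom
    simp at hdom
    omega
  unfold Pre_countBalls at hpre
  unfold countBalls countBalls_alt
  rw [foldA_eq]
  set L := PySem.List.pyRange low (high + 1) 1 with hL
  have hLne : L ≠ [] := by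
    intro h
    have h2 := PySem.List.length_pyRange_one (a := low) (b := high + 1)
    rw [show PySem.List.pyRange low (high + 1) 1 = L from rfl, h] at h2
    simp at h2
    omega
  have hSne : L.map pvDigitSum ≠ [] := fun h => hLne (List.map_eq_nil_iff.mp h)
  have hbound : ∀ x ∈ L.map pvDigitSum, 0 ≤ x ∧ x < 91 := by
    intro x hx
    obtain ⟨i, hiL, hieq⟩ := List.mem_map.mp hx
    have hi := (PySem.List.mem_pyRange_one).mp hiL
    exact ⟨hieq ▸ pvDigitSum_nonneg i, hieq ▸ pvDigitSum_lt_91 i (by omega)⟩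
  obtain ⟨hlen, hget⟩ := loopB_inv low (high - low + 1).toNat high le_rfl
    (fun k hk1 hk2 => ⟨pvDigitSum_nonneg k, pvDigitSum_lt_91 k (by omega)⟩)
    (List.replicate 91 (0 : Int)) (by simp)
  have harr : ∀ t : Nat, t < 91 →
      (pvLoopB low high (List.replicate 91 (0 : Int))).getD t 0
        = ((L.map pvDigitSum).count (t : Int) : Int) := by
    intro t ht
    rw [hget t ht]
    simp only [List.getD_eq_getElem?_getD, List.getElem?_replicate, if_pos ht,
      Option.getD_some, zero_add, hL]
  have hnn : ∀ x ∈ pvLoopB low high (List.replicate 91 (0 : Int)), 0 ≤ x := by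
    intro x hx
    obtain ⟨t, ht, hteq⟩ := List.mem_iff_getElem.mp hx
    have ht91 : t < 91 := by omega
    have hx0 : x = (pvLoopB low high (List.replicate 91 (0 : Int))).getD t 0 := by
      rw [List.getD_eq_getElem?_getD, List.getElem?_eq_getElem ht, Option.getD_some]
      exact hteq.symm
    rw [harr t ht91] at hx0
    omega
  rw [runmax_eq _ (by intro h; rw [h] at hlen; simp at hlen) hnn]
  exact final_eq (L.map pvDigitSum) hSne hbound _ hlen harr
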